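-- pv_equiv track=rewrite | github.com/erjantj/hackerrank | frequency-queries.py | solve
-- ===== SOURCE A (Python) =====
-- from collections import defaultdict
--
-- def solve(queries):
--     freqs = defaultdict(int)
--     items = defaultdict(int)
--     result = []
--
--     for row in queries:
--         if row[0] == 1:
--             if items[freqs[row[1]]]:
--                 items[freqs[row[1]]] = items[freqs[row[1]]] - 1
--             freqs[row[1]] = freqs[row[1]] + 1
--             items[freqs[row[1]]] = items[freqs[row[1]]]+1
--         elif row[0] == 2:
--             if freqs[row[1]] > 0:
--                 items[freqs[row[1]]] = items[freqs[row[1]]] - 1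
--                 freqs[row[1]] = freqs[row[1]] - 1
--                 items[freqs[row[1]]] = items[freqs[row[1]]]+1
--         elif row[0] == 3:
--             if items[row[1]]>0:
--                 result.append(1)
--             else:
--                 result.append(0)
--     return result
-- ===== SOURCE B (Python) =====
-- def solve(queries):
--     freqs = {}
--     result = []
--     for row in queries:
--         if row[0] == 1:
--             freqs[row[1]] = freqs.get(row[1], 0) + 1
--         elif row[0] == 2:
--             if freqs.get(row[1], 0) > 0:
--                 freqs[row[1]] -= 1
--         elif row[0] == 3:
--             result.append(1 if row[1] in freqs.values() else 0)
--     return result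
-- ===== Notes on version B (the rewrite author's own statement) =====
-- stated objective: simpler
-- what changed: B drops A's maintained count-of-counts table (items) entirely: it keeps one plain value->frequency dict updated with .get and answers a type-3 query by scanning freqs.values() for the queried frequency.
-- outside the precondition, e.g. on solve([(1, 1), (2, 1), (1, 2), (3, 0)]): A returns [0], B returns [1]
import Mathlib
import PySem

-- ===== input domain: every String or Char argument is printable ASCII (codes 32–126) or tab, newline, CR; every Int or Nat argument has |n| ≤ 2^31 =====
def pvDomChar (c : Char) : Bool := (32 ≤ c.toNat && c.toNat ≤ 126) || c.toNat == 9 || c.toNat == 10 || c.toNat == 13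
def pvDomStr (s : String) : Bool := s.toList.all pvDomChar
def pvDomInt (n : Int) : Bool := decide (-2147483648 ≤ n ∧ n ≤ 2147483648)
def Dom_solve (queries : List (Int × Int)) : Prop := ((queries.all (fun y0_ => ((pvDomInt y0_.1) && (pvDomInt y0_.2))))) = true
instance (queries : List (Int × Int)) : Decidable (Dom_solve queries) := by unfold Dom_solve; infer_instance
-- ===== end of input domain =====

-- B replaces A's maintained count-of-counts table by a single value→frequency dict with a
-- values() scan for type-3 queries (objective: simpler); equivalence is on Pre_ (no (3,0) query).

-- ===== PORT A =====
-- defaultdict(int) reads are ported as getD _ 0 (the implicitly inserted zero entries never change any getD result A reads)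
def solveLoopA : List (Int × Int) → PySem.Dict Int Int → PySem.Dict Int Int → List Int → List Int
  | [], _, _, result => result
  | row :: rest, freqs, items, result =>
    if row.1 = 1 then
      let f := freqs.getD row.2 0
      let items1 := if items.getD f 0 ≠ 0 then items.insert f (items.getD f 0 - 1) else items
      let freqs1 := freqs.insert row.2 (f + 1)
      let items2 := items1.insert (f + 1) (items1.getD (f + 1) 0 + 1)
      solveLoopA rest freqs1 items2 result
    else if row.1 = 2 then
      if freqs.getD row.2 0 > 0 then
        let f := freqs.getD row.2 0
        let items1 := items.insert f (items.getD f 0 - 1)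
        let freqs1 := freqs.insert row.2 (f - 1)
        let items2 := items1.insert (f - 1) (items1.getD (f - 1) 0 + 1)
        solveLoopA rest freqs1 items2 result
      else solveLoopA rest freqs items result
    else if row.1 = 3 then
      solveLoopA rest freqs items (result ++ [if items.getD row.2 0 > 0 then 1 else 0])
    else solveLoopA rest freqs items result

def solve (queries : List (Int × Int)) : List Int :=
  solveLoopA queries PySem.Dict.empty PySem.Dict.empty []

-- ===== PORT B =====
def solveLoopB : List (Int × Int) → PySem.Dict Int Int → List Int → List Int
  | [], _, result => result
  | row :: rest, freqs, result =>
    if row.1 = 1 then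
      solveLoopB rest (freqs.insert row.2 (freqs.getD row.2 0 + 1)) result
    else if row.1 = 2 then
      if freqs.getD row.2 0 > 0 then
        solveLoopB rest (freqs.insert row.2 (freqs.getD row.2 0 - 1)) result
      else solveLoopB rest freqs result
    else if row.1 = 3 then
      solveLoopB rest freqs (result ++ [if row.2 ∈ freqs.values then 1 else 0])
    else solveLoopB rest freqs result

def solve_alt (queries : List (Int × Int)) : List Int :=
  solveLoopB queries PySem.Dict.empty []

-- ===== PRECONDITION & SPEC =====
-- Pre_ excludes query lists containing a frequency query (3,0): whether "some value has frequency 0"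
-- is an accident of representation — A answers from leftover items[0] counter state (including keys
-- its failed defaultdict lookups created), B from zero-valued dict entries — and both are defensible.
def Pre_solve (queries : List (Int × Int)) : Prop :=
  ∀ q ∈ queries, q.1 = 3 → q.2 ≠ 0
instance (queries : List (Int × Int)) : Decidable (Pre_solve queries) := by unfold Pre_solve; infer_instance

def pvWitness_solve : (List (Int × Int)) := [(1, 5), (1, 5), (1, 6), (3, 2), (2, 5), (3, 1)]

def Spec_solve (queries : List (Int × Int)) (out : List Int) : Prop := out = solve_alt queries
instance (queries : List (Int × Int)) (out : List Int) : Decidable (Spec_solve queries out) := by unfold Spec_solve; infer_instance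

-- ===== CLAIM (what is proved, stated in full; the proofs are below) =====
def Claim_equal_solve : Prop := ∀ (queries : List (Int × Int)), Dom_solve queries → Pre_solve queries → Spec_solve queries (solve queries)

-- ===== LEMMAS AND PROOFS =====

-- number of keys of d currently mapped to frequency g (what A's items[g] tracks for g ≠ 0)
def pvCnt (d : PySem.Dict Int Int) (g : Int) : Int :=
  ((d.keys.countP (fun k => d.getD k 0 == g) : Nat) : Int)

-- the loop invariant tying A's (freqs, items) to B's freqs
def pvInv (fA iA fB : PySem.Dict Int Int) : Prop :=
  fB.keys.Nodup ∧
  (∀ k, fA.getD k 0 = fB.getD k 0) ∧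
  (∀ k, 0 ≤ fB.getD k 0) ∧
  (∀ g, g ≠ 0 → iA.getD g 0 = pvCnt fB g)

lemma countP_update (l : List Int) (p p' : Int → Bool) (v : Int)
    (hn : l.Nodup) (hv : v ∈ l) (h : ∀ x ∈ l, x ≠ v → p' x = p x) :
    ((l.countP p' : Nat) : Int) = ((l.countP p : Nat) : Int)
      + (if p' v then 1 else 0) - (if p v then 1 else 0) := by
  induction l with
  | nil => cases hv
  | cons a l ih =>
    rcases List.nodup_cons.mp hn with ⟨ha, hn'⟩
    rcases List.mem_cons.mp hv with rfl | hv
    · have hl : l.countP p' = l.countP p := by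
        apply List.countP_congr
        intro x hx
        simp [h x (List.mem_cons_of_mem _ hx) (fun hxv => ha (hxv ▸ hx))]
      simp only [List.countP_cons, hl]
      split_ifs <;> push_cast <;> omega
    · have hav : a ≠ v := fun hav => ha (hav ▸ hv)
      have hpa : p' a = p a := h a List.mem_cons_self hav
      have hrec := ih hn' hv (fun x hx => h x (List.mem_cons_of_mem _ hx))
      simp only [List.countP_cons, hpa]
      split_ifs at hrec ⊢ <;> push_cast at hrec ⊢ <;> omega

-- pvCnt after overwriting an existing key v with x
lemma pvCnt_insert_contains (fB : PySem.Dict Int Int) (v x g : Int)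
    (hn : fB.keys.Nodup) (hv : v ∈ fB.keys) :
    pvCnt (fB.insert v x) g =
      pvCnt fB g + (if x = g then 1 else 0) - (if fB.getD v 0 = g then 1 else 0) := by
  unfold pvCnt
  have hk : (fB.insert v x).keys = fB.keys :=
    PySem.Dict.keys_insert_of_contains fB x ((PySem.Dict.contains_iff_mem_keys _ _).mpr hv)
  rw [hk]
  have hupd := countP_update fB.keys (fun k => fB.getD k 0 == g)
      (fun k => (fB.insert v x).getD k 0 == g) v hn hv
      (by intro k hk hkv; simp [PySem.Dict.getD_insert, hkv])
  rw [hupd]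
  simp

-- pvCnt after appending a fresh key v with value x
lemma pvCnt_insert_fresh (fB : PySem.Dict Int Int) (v x g : Int)
    (hv : v ∉ fB.keys) :
    pvCnt (fB.insert v x) g = pvCnt fB g + (if x = g then 1 else 0) := by
  unfold pvCnt
  have hc : fB.contains v = false := by
    by_contra h
    exact hv ((PySem.Dict.contains_iff_mem_keys _ _).mp (by revert h; cases fB.contains v <;> simp))
  rw [PySem.Dict.keys_insert_of_not_contains fB x hc, List.countP_append]
  have hcong : fB.keys.countP (fun k => (fB.insert v x).getD k 0 == g)
      = fB.keys.countP (fun k => fB.getD k 0 == g) := by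
    apply List.countP_congr
    intro k hk
    have hkv : k ≠ v := fun h => hv (h ▸ hk)
    simp [PySem.Dict.getD_insert, hkv]
  rw [hcong]
  simp [PySem.Dict.getD_insert]

-- positivity of pvCnt reads back a witness key
lemma pvCnt_pos_iff (fB : PySem.Dict Int Int) (g : Int) :
    0 < pvCnt fB g ↔ ∃ k ∈ fB.keys, fB.getD k 0 = g := by
  unfold pvCnt
  rw [show ((0 : Int) < ((fB.keys.countP (fun k => fB.getD k 0 == g) : Nat) : Int)) ↔
      0 < fB.keys.countP (fun k => fB.getD k 0 == g) by exact_mod_cast Iff.rfl]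
  rw [List.countP_pos_iff]
  simp

lemma mem_values_iff (fB : PySem.Dict Int Int) (hn : fB.keys.Nodup) (g : Int) :
    g ∈ fB.values ↔ ∃ k ∈ fB.keys, fB.getD k 0 = g := by
  rw [PySem.Dict.values_eq_map_keys fB hn 0, List.mem_map]

lemma not_mem_keys_of_not_contains (fB : PySem.Dict Int Int) (v : Int)
    (hv : v ∉ fB.keys) : fB.contains v = false := by
  by_contra h
  exact hv ((PySem.Dict.contains_iff_mem_keys _ _).mp (by revert h; cases fB.contains v <;> simp))

-- main loop equivalence under the invariant
lemma loop_eq (rest : List (Int × Int)) : ∀ (fA iA fB : PySem.Dict Int Int) (res : List Int),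
    pvInv fA iA fB → (∀ q ∈ rest, q.1 = 3 → q.2 ≠ 0) →
    solveLoopA rest fA iA res = solveLoopB rest fB res := by
  induction rest with
  | nil => intro _ _ _ _ _ _; rfl
  | cons row rest ih =>
    intro fA iA fB res hinv hpre
    obtain ⟨hnd, hfeq, hnn, hcnt⟩ := hinv
    have hpre' : ∀ q ∈ rest, q.1 = 3 → q.2 ≠ 0 :=
      fun q hq => hpre q (List.mem_cons_of_mem _ hq)
    obtain ⟨t, v⟩ := row
    by_cases ht1 : t = 1
    · -- type 1
      simp only [solveLoopA, solveLoopB, ht1]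
      have hfB : fB.getD v 0 = fA.getD v 0 := (hfeq v).symm
      have hf0 : 0 ≤ fA.getD v 0 := hfB ▸ hnn v
      apply ih
      · refine ⟨PySem.Dict.nodup_keys_insert _ _ _ hnd, ?_, ?_, ?_⟩
        · intro k
          simp only [PySem.Dict.getD_insert, hfB]
          split_ifs with hk
          · rfl
          · exact hfeq k
        · intro k
          simp only [PySem.Dict.getD_insert, hfB]
          split_ifs with hk
          · omega
          · exact hnn k
        · intro g hg
          by_cases hvmem : v ∈ fB.keys
          · -- existing key: its frequency f moves to f + 1
            rw [pvCnt_insert_contains fB v (fB.getD v 0 + 1) g hnd hvmem, hfB]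
            by_cases hgf1 : g = fA.getD v 0 + 1
            · subst hgf1
              have hA1 : iA.getD (fA.getD v 0 + 1) 0 = pvCnt fB (fA.getD v 0 + 1) :=
                hcnt _ (by omega)
              by_cases hbranch : iA.getD (fA.getD v 0) 0 ≠ 0
              · rw [if_pos hbranch]
                simp only [PySem.Dict.getD_insert]
                split_ifs <;> omega
              · rw [if_neg hbranch]
                simp only [PySem.Dict.getD_insert]
                split_ifs <;> omega
            · by_cases hgf : g = fA.getD v 0
              · have hAg : iA.getD g 0 = pvCnt fB g := hcnt g hg
                have hpos : 0 < pvCnt fB g :=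
                  (pvCnt_pos_iff fB g).mpr ⟨v, hvmem, by rw [hfB, ← hgf]⟩
                subst hgf
                rw [if_pos (show iA.getD (fA.getD v 0) 0 ≠ 0 by omega)]
                simp only [PySem.Dict.getD_insert]
                split_ifs <;> omega
              · have hAg : iA.getD g 0 = pvCnt fB g := hcnt g hg
                by_cases hbranch : iA.getD (fA.getD v 0) 0 ≠ 0
                · rw [if_pos hbranch]
                  simp only [PySem.Dict.getD_insert]
                  split_ifs <;> omega
                · rw [if_neg hbranch]
                  simp only [PySem.Dict.getD_insert]
                  split_ifs <;> omega
          · -- fresh key: frequency 0 becomes 1, a (v, 1) entry is appended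
            have hfz : fA.getD v 0 = 0 := by
              rw [← hfB]
              exact PySem.Dict.getD_of_not_contains fB (0:Int)
                (not_mem_keys_of_not_contains fB v hvmem)
            rw [pvCnt_insert_fresh fB v (fB.getD v 0 + 1) g hvmem, hfB, hfz]
            have hAg : iA.getD g 0 = pvCnt fB g := hcnt g hg
            by_cases hgone : g = 1
            · subst hgone
              have hA1 : iA.getD ((0:Int) + 1) 0 = pvCnt fB 1 := by
                rw [show ((0:Int) + 1) = 1 by norm_num]; exact hcnt 1 one_ne_zero
              by_cases hbranch : iA.getD (0:Int) 0 ≠ 0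
              · rw [if_pos hbranch]
                simp only [PySem.Dict.getD_insert]
                split_ifs <;> omega
              · rw [if_neg hbranch]
                simp only [PySem.Dict.getD_insert]
                split_ifs <;> omega
            · by_cases hbranch : iA.getD (0:Int) 0 ≠ 0
              · rw [if_pos hbranch]
                simp only [PySem.Dict.getD_insert]
                split_ifs <;> omega
              · rw [if_neg hbranch]
                simp only [PySem.Dict.getD_insert]
                split_ifs <;> omega
      · exact hpre'
    · by_cases ht2 : t = 2
      · -- type 2
        simp only [solveLoopA, solveLoopB, ht2]
        rw [← hfeq v]
        by_cases hpos : fA.getD v 0 > 0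
        · rw [if_pos hpos, if_pos hpos]
          have hfB : fB.getD v 0 = fA.getD v 0 := (hfeq v).symm
          have hvmem : v ∈ fB.keys := by
            by_contra hvn
            have := PySem.Dict.getD_of_not_contains fB (0:Int)
              (not_mem_keys_of_not_contains fB v hvn)
            omega
          apply ih
          · refine ⟨PySem.Dict.nodup_keys_insert _ _ _ hnd, ?_, ?_, ?_⟩
            · intro k
              simp only [PySem.Dict.getD_insert]
              split_ifs with hk
              · rfl
              · exact hfeq k
            · intro k
              simp only [PySem.Dict.getD_insert]
              split_ifs with hk
              · omega
              · exact hnn k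
            · intro g hg
              rw [pvCnt_insert_contains fB v (fA.getD v 0 - 1) g hnd hvmem, hfB]
              by_cases hgf : g = fA.getD v 0
              · have hAg : iA.getD g 0 = pvCnt fB g := hcnt g hg
                subst hgf
                simp only [PySem.Dict.getD_insert]
                split_ifs <;> omega
              · by_cases hgf1 : g = fA.getD v 0 - 1
                · subst hgf1
                  have hA1 : iA.getD (fA.getD v 0 - 1) 0 = pvCnt fB (fA.getD v 0 - 1) :=
                    hcnt _ hg
                  simp only [PySem.Dict.getD_insert]
                  split_ifs <;> omega
                · have hAg : iA.getD g 0 = pvCnt fB g := hcnt g hg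
                  simp only [PySem.Dict.getD_insert]
                  split_ifs <;> omega
          · exact hpre'
        · rw [if_neg hpos, if_neg hpos]
          exact ih fA iA fB res ⟨hnd, hfeq, hnn, hcnt⟩ hpre'
      · by_cases ht3 : t = 3
        · -- type 3
          simp only [solveLoopA, solveLoopB, ht3]
          have hv0 : v ≠ 0 := hpre (t, v) List.mem_cons_self ht3
          have hiff : (iA.getD v 0 > 0) ↔ v ∈ fB.values := by
            rw [hcnt v hv0]
            exact (pvCnt_pos_iff fB v).trans (mem_values_iff fB hnd v).symm
          have hbit : (if iA.getD v 0 > 0 then (1:Int) else 0)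
              = (if v ∈ fB.values then 1 else 0) := by
            by_cases h : iA.getD v 0 > 0
            · rw [if_pos h, if_pos (hiff.mp h)]
            · rw [if_neg h, if_neg (fun hm => h (hiff.mpr hm))]
          rw [hbit]
          exact ih fA iA fB _ ⟨hnd, hfeq, hnn, hcnt⟩ hpre'
        · simp only [solveLoopA, solveLoopB, if_neg ht1, if_neg ht2, if_neg ht3]
          exact ih fA iA fB res ⟨hnd, hfeq, hnn, hcnt⟩ hpre'

-- ===== VERDICT (by name: the statement is the Claim_ definition above) =====
theorem solve_spec : Claim_equal_solve := by
  intro queries _ hpre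
  unfold Spec_solve solve solve_alt
  apply loop_eq
  · refine ⟨by simp [PySem.Dict.keys_empty], ?_, ?_, ?_⟩
    · intro k; simp [PySem.Dict.getD_empty]
    · intro k; simp [PySem.Dict.getD_empty]
    · intro g hg; simp [PySem.Dict.getD_empty, pvCnt, PySem.Dict.keys_empty]
  · exact hpre
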